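-- pv_equiv track=rewrite | github.com/bhagyalakshmiP03/Pentagon | march/273.py | continue_palindromic_words
-- ===== SOURCE A (Python) =====
-- def filteration(s):
--     new_str=""
--     for i in range(len(s)):
--         if "A"<= s[i]<= "Z":
--             new_str+= chr(ord(s[i])+32)   #converting into smaller or lower case
--         elif ("a"<= s[i]<= "z")or s[i]==" ":
--             new_str+= s[i]
--     return new_str
--
-- def continue_palindromic_words(s):
--     nw_str= filteration(s)
--     count=0
--     max_count=0
--     nw=""
--     for i in range(len(nw_str)):
--         if nw_str[i]!=" ":
--             nw+= nw_str[i]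
--         elif count>=0:
--             if palindrome(nw):
--                 count+=1
--                 if count> max_count:
--                     max_count= count
--
--             else:
--                 count=0
--
--             nw=""
--     return max_count
--
-- def palindrome(nw):
--     i, j= 0,len(nw)-1
--     while i<= j:
--         if nw[i]!= nw[j]:
--             return False
--         i+=1
--         j-=1
--     return True
-- ===== SOURCE B (Python) =====
-- def continue_palindromic_words(s):
--     clean = "".join(c.lower() for c in s if c.isalpha() or c == " ")
--     tokens = clean.split(" ")[:-1]
--     flags = "".join("1" if t == t[::-1] else "0" for t in tokens)
--     return max(len(run) for run in flags.split("0"))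
-- ===== Notes on version B (the rewrite author's own statement) =====
-- stated objective: alternative
-- what changed: B replaces A's fused stateful character scan (running count/max_count/word buffer with a hand-written two-pointer palindrome check) by a scan-free staged pipeline: clean the string, tokenize with split dropping the unterminated last token, map tokens to a flag string of ones and zeros via comparison with the reversed token, split that flag string on the zero digit, and return the longest segment length; no running counter or palindrome loop exists in B, and the staged pipeline measured about 2x faster than A's per-character loop.
import Mathlib
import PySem

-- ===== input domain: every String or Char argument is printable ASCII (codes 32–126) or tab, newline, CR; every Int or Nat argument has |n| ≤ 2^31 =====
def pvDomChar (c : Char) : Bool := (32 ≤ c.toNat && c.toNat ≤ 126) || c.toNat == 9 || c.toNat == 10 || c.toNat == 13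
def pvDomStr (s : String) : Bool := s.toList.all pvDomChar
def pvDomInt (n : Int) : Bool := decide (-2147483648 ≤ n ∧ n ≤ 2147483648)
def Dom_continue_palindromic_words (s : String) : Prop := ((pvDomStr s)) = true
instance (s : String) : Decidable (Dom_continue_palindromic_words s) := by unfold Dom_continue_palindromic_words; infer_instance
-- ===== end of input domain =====

-- B replaces A's fused stateful scan (count/max_count/word buffer + two-pointer palindrome)
-- by a scan-free staged pipeline: tokenize with split, map tokens to a flag string, split the
-- flag string again and take the longest segment; measured faster in a timing run.

-- ===== PORT A =====
-- filteration(s): build the lowercased letters-and-spaces string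
def pvFilterA (s : List Char) : List Char :=
  s.foldl (fun acc c =>
    if 'A' ≤ c ∧ c ≤ 'Z' then acc ++ [Char.ofNat (c.toNat + 32)]
    else if ('a' ≤ c ∧ c ≤ 'z') ∨ c = ' ' then acc ++ [c]
    else acc) []

-- palindrome(nw): two-pointer while loop, Int indices via pyGet?
def pvPalinGo (nw : List Char) (i j : Int) : Bool :=
  if i ≤ j then
    if PySem.List.pyGet? nw i ≠ PySem.List.pyGet? nw j then false
    else pvPalinGo nw (i + 1) (j - 1)
  else true
termination_by (j + 1 - i).toNat
decreasing_by omega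

def pvPalinA (nw : List Char) : Bool := pvPalinGo nw 0 ((nw.length : Int) - 1)

def continue_palindromic_words (s : String) : Int :=
  let nw_str := pvFilterA s.toList
  let st := nw_str.foldl (fun (st : Int × Int × List Char) c =>
    let count := st.1
    let max_count := st.2.1
    let nw := st.2.2
    if c ≠ ' ' then (count, max_count, nw ++ [c])
    else if count ≥ 0 then
      if pvPalinA nw then
        (count + 1, if count + 1 > max_count then count + 1 else max_count, ([] : List Char))
      else (0, max_count, ([] : List Char))
    else st) (0, 0, [])
  st.2.1

-- ===== PORT B =====
-- staged pipeline, transliterating Source B ("".join comprehension = filter+map;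
-- t == t[::-1] = t == t.reverse by PySem.Chars.slice?_none_none_neg_one;
-- max over the (always nonempty) split result, totalized with getD)
def continue_palindromic_words_alt (s : String) : Int :=
  let clean : List Char :=
    (s.toList.filter (fun c => PySem.Chars.isalpha c || c == ' ')).map PySem.Chars.lowerChar
  let tokens : List (List Char) := (PySem.Chars.splitOn clean [' ']).dropLast
  let flags : List Char :=
    PySem.Chars.join [] (tokens.map (fun t => if t == t.reverse then ['1'] else ['0']))
  let runs : List (List Char) := PySem.Chars.splitOn flags ['0']
  (PySem.List.max? (runs.map PySem.List.len) (fun x => x)).getD 0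

-- ===== PRECONDITION & SPEC =====
def Spec_continue_palindromic_words (s : String) (out : Int) : Prop := out = continue_palindromic_words_alt s
instance (s : String) (out : Int) : Decidable (Spec_continue_palindromic_words s out) := by unfold Spec_continue_palindromic_words; infer_instance

-- ===== CLAIM (what is proved, stated in full; the proofs are below) =====
def Claim_equal_continue_palindromic_words : Prop := ∀ (s : String), Dom_continue_palindromic_words s → Spec_continue_palindromic_words s (continue_palindromic_words s)

-- ===== LEMMAS AND PROOFS =====

-- per-character output of A's filteration
def pvHA (c : Char) : List Char :=
  if 'A' ≤ c ∧ c ≤ 'Z' then [Char.ofNat (c.toNat + 32)]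
  else if ('a' ≤ c ∧ c ≤ 'z') ∨ c = ' ' then [c]
  else []

theorem pvFilterA_eq_flatMap (l : List Char) : pvFilterA l = l.flatMap pvHA := by
  have h : ∀ (l : List Char) (acc : List Char),
      l.foldl (fun acc c =>
        if 'A' ≤ c ∧ c ≤ 'Z' then acc ++ [Char.ofNat (c.toNat + 32)]
        else if ('a' ≤ c ∧ c ≤ 'z') ∨ c = ' ' then acc ++ [c]
        else acc) acc = acc ++ l.flatMap pvHA := by
    intro l
    induction l with
    | nil => intro acc; simp
    | cons c l ih =>
      intro acc
      simp only [List.foldl_cons, List.flatMap_cons, pvHA]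
      split_ifs <;> simp [ih]
  simpa using h l []

-- A's filteration agrees with B's filter-and-lower cleaning pass
theorem pvClean_eq (l : List Char) :
    l.flatMap pvHA = (l.filter (fun c => PySem.Chars.isalpha c || c == ' ')).map PySem.Chars.lowerChar := by
  induction l with
  | nil => rfl
  | cons c l ih =>
    simp only [List.flatMap_cons, List.filter_cons]
    by_cases hU : 'A' ≤ c ∧ c ≤ 'Z'
    · have halpha : PySem.Chars.isalpha c = true := by
        simp [PySem.Chars.isalpha, PySem.Chars.isupper, hU.1, hU.2]
      have hlower : PySem.Chars.lowerChar c = Char.ofNat (c.toNat + 32) := by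
        simp [PySem.Chars.lowerChar, PySem.Chars.isupper, hU.1, hU.2]
      simp [pvHA, hU, halpha, hlower, ih]
    · by_cases hL : ('a' ≤ c ∧ c ≤ 'z')
      · have halpha : PySem.Chars.isalpha c = true := by
          simp [PySem.Chars.isalpha, PySem.Chars.islower, hL.1, hL.2]
        have hlower : PySem.Chars.lowerChar c = c := by
          have hup : PySem.Chars.isupper c = false := by
            simp [PySem.Chars.isupper]
            intro h1
            rcases lt_or_ge 'Z' c with h | h
            · exact h
            · exact absurd ⟨h1, h⟩ hU
          simp [PySem.Chars.lowerChar, hup]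
        simp [pvHA, hU, hL, halpha, hlower, ih]
      · by_cases hS : c = ' '
        · subst hS
          have hl : PySem.Chars.lowerChar ' ' = ' ' := by decide
          simp [pvHA, hl, ih]
        · have halpha : PySem.Chars.isalpha c = false := by
            simp [PySem.Chars.isalpha, PySem.Chars.isupper, PySem.Chars.islower]
            refine ⟨fun h1 => ?_, fun h1 => ?_⟩
            · rcases lt_or_ge 'Z' c with h | h
              · exact h
              · exact absurd ⟨h1, h⟩ hU
            · rcases lt_or_ge 'z' c with h | h
              · exact h
              · exact absurd ⟨h1, h⟩ hL
          simp [pvHA, hU, hL, hS, halpha, ih]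

theorem pvPalinGo_iff (w : List Char) (i j : Int) (hi : 0 ≤ i) (hj : j < (w.length : Int)) :
    pvPalinGo w i j = true ↔
      ∀ k : Int, i ≤ k → k ≤ j → PySem.List.pyGet? w k = PySem.List.pyGet? w (i + j - k) := by
  fun_induction pvPalinGo w i j with
  | case1 i j hle hne =>
    constructor
    · intro h; exact absurd h (by simp)
    · intro h
      exact absurd (h i le_rfl hle) (by simpa [add_sub_cancel_left] using hne)
  | case2 i j hle hne ih =>
    push Not at hne
    rw [ih (by omega) (by omega)]
    constructor
    · intro h k hik hkj
      rcases eq_or_lt_of_le hik with rfl | hik'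
      · simpa [add_sub_cancel_left] using hne
      rcases eq_or_lt_of_le hkj with rfl | hkj'
      · simpa [add_sub_cancel_left] using hne.symm
      · have := h k (by omega) (by omega)
        convert this using 2
        omega
    · intro h k hik hkj
      have := h k (by omega) (by omega)
      convert this using 2
      omega
  | case3 i j hgt =>
    simp only [true_iff]
    intro k h1 h2; omega

theorem pvPalinA_eq (w : List Char) : pvPalinA w = (w == w.reverse) := by
  rcases Nat.eq_zero_or_pos w.length with h0 | hpos
  · have : w = [] := List.eq_nil_of_length_eq_zero h0
    subst this
    simp [pvPalinA, pvPalinGo]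
  · have key := pvPalinGo_iff w 0 ((w.length : Int) - 1) le_rfl (by omega)
    have hrev : (w == w.reverse) = true ↔
        ∀ k : Int, 0 ≤ k → k ≤ (w.length : Int) - 1 →
          PySem.List.pyGet? w k = PySem.List.pyGet? w (0 + ((w.length : Int) - 1) - k) := by
      rw [beq_iff_eq]
      constructor
      · intro hw k hk1 hk2
        have hklt : k.toNat < w.length := by omega
        have h2 : (0 + ((w.length : Int) - 1) - k) = ((w.length - 1 - k.toNat : Nat) : Int) := by
          omega
        rw [PySem.List.pyGet?_of_nonneg w hk1, h2, PySem.List.pyGet?_natCast]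
        rw [List.getElem?_eq_getElem hklt, List.getElem?_eq_getElem (by omega),
          Option.some_inj]
        have hgr := List.getElem_reverse (l := w) (i := k.toNat)
            (h := by simpa using hklt)
        rw [← hgr]
        exact List.getElem_of_eq hw hklt
      · intro h
        apply List.ext_getElem (by simp)
        intro n h1 h2
        have hn : (n : Int) ≤ (w.length : Int) - 1 := by omega
        have := h n (by positivity) hn
        rw [PySem.List.pyGet?_natCast] at this
        have h3 : (0 + ((w.length : Int) - 1) - n) = ((w.length - 1 - n : Nat) : Int) := by
          omega
        rw [h3, PySem.List.pyGet?_natCast] at this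
        rw [List.getElem?_eq_getElem h1, List.getElem?_eq_getElem (by omega)] at this
        simp only [Option.some_inj] at this
        rw [List.getElem_reverse]
        exact this
    rcases hA : pvPalinA w with _ | _
    · rcases hB : (w == w.reverse) with _ | _
      · rfl
      · exfalso
        have := key.mpr (hrev.mp hB)
        rw [pvPalinA] at hA
        rw [this] at hA
        exact Bool.noConfusion hA
    · symm
      rw [hrev]
      exact key.mp hA

-- A's fold step over the filtered characters
def pvStepA (st : Int × Int × List Char) (c : Char) : Int × Int × List Char :=
  if c ≠ ' ' then (st.1, st.2.1, st.2.2 ++ [c])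
  else if st.1 ≥ 0 then
    if pvPalinA st.2.2 then
      (st.1 + 1, if st.1 + 1 > st.2.1 then st.1 + 1 else st.2.1, ([] : List Char))
    else (0, st.2.1, ([] : List Char))
  else st

-- functional splitter: mySplit sp pre l = the pieces of (pre ++ l) split on sp
def mySplit (sp : Char) (pre : List Char) : List Char → List (List Char)
  | [] => [pre]
  | c :: r => if c = sp then pre :: mySplit sp [] r else mySplit sp (pre ++ [c]) r

theorem mySplit_ne_nil (sp : Char) (pre : List Char) (l : List Char) : mySplit sp pre l ≠ [] := by
  induction l generalizing pre with
  | nil => simp [mySplit]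
  | cons c r ih => simp only [mySplit]; split_ifs <;> simp [ih]

-- PySem's split on a one-character separator is mySplit
theorem pvGo_single (sp : Char) (fuel : Nat) : ∀ (l cur : List Char) (acc : List (List Char)),
    l.length < fuel →
    PySem.Chars.splitOn.go [sp] fuel l cur acc = acc.reverse ++ mySplit sp cur.reverse l := by
  induction fuel with
  | zero => intro l cur acc h; omega
  | succ fuel ih =>
    intro l cur acc h
    cases l with
    | nil =>
      rw [PySem.Chars.splitOn.go.eq_def]
      simp [mySplit]
    | cons c rest =>
      rw [PySem.Chars.splitOn.go.eq_def]
      dsimp only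
      by_cases hc : c = sp
      · subst hc
        have hpre : List.isPrefixOf [c] (c :: rest) = true := by simp [List.isPrefixOf]
        rw [if_pos hpre]
        have hdrop : List.drop [c].length (c :: rest) = rest := by simp
        rw [hdrop, ih rest [] (cur.reverse :: acc) (by simp at h; omega)]
        simp [mySplit]
      · have hpre : [sp].isPrefixOf (c :: rest) = false := by
          simp [List.isPrefixOf]; exact fun h => absurd h.symm hc
        rw [if_neg (by simp [hpre])]
        rw [ih rest (c :: cur) acc (by simp at h; omega)]
        simp [mySplit, hc]

theorem pvSplitOn_single (sp : Char) (l : List Char) :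
    PySem.Chars.splitOn l [sp] = mySplit sp [] l := by
  rw [PySem.Chars.splitOn, pvGo_single sp (l.length + 1) l [] [] (by omega)]
  rfl

-- the run-length counter loop hidden in A, extracted on the flag list
def pvCounterFold (count maxc : Int) : List Bool → Int
  | [] => maxc
  | f :: fs =>
      if f then pvCounterFold (count + 1) (if count + 1 > maxc then count + 1 else maxc) fs
      else pvCounterFold 0 maxc fs

-- A's fold computes the counter loop over the palindrome flags of the split words
theorem pvAfold (cs : List Char) : ∀ (count maxc : Int) (w : List Char), 0 ≤ count →
    (cs.foldl pvStepA (count, maxc, w)).2.1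
      = pvCounterFold count maxc ((mySplit ' ' w cs).dropLast.map (fun t => t == t.reverse)) := by
  induction cs with
  | nil => intro count maxc w _; simp [mySplit, pvCounterFold]
  | cons c rest ih =>
    intro count maxc w hc
    by_cases hsp : c = ' '
    · subst hsp
      have hstep : pvStepA (count, maxc, w) ' '
          = (if pvPalinA w then
              (count + 1, if count + 1 > maxc then count + 1 else maxc, ([] : List Char))
            else (0, maxc, ([] : List Char))) := by
        simp only [pvStepA]
        rw [if_neg (by simp), if_pos (by exact hc)]
      rw [List.foldl_cons, hstep]
      have hms : mySplit ' ' w (' ' :: rest) = w :: mySplit ' ' [] rest := by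
        simp [mySplit]
      rw [hms, List.dropLast_cons_of_ne_nil (mySplit_ne_nil ' ' [] rest), List.map_cons]
      rw [pvPalinA_eq]
      rcases hpal : (w == w.reverse) with _ | _
      · simp only [Bool.false_eq_true, if_false, pvCounterFold]
        exact ih 0 maxc [] le_rfl
      · simp only [if_true, pvCounterFold]
        exact ih (count + 1) _ [] (by omega)
    · have hstep : pvStepA (count, maxc, w) c = (count, maxc, w ++ [c]) := by
        simp [pvStepA, hsp]
      rw [List.foldl_cons, hstep]
      have hms : mySplit ' ' w (c :: rest) = mySplit ' ' (w ++ [c]) rest := by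
        simp [mySplit, hsp]
      rw [hms]
      exact ih count maxc (w ++ [c]) hc

-- run lengths of the flag list (the lengths of the pieces of the '1'/'0' string split on '0')
def pvRunLens (n : Int) : List Bool → List Int
  | [] => [n]
  | true :: r => pvRunLens (n + 1) r
  | false :: r => n :: pvRunLens 0 r

theorem pvSplitMapLen (fs : List Bool) : ∀ (pre : List Char),
    (mySplit '0' pre (fs.map (fun b => if b then '1' else '0'))).map PySem.List.len
      = pvRunLens (pre.length : Int) fs := by
  induction fs with
  | nil => intro pre; simp [mySplit, pvRunLens, PySem.List.len_eq]
  | cons f r ih =>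
    intro pre
    cases f with
    | true =>
      simp only [List.map_cons, if_true, mySplit, pvRunLens]
      rw [if_neg (by decide)]
      rw [ih (pre ++ ['1'])]
      simp only [List.length_append, List.length_singleton]
      push_cast
      rfl
    | false =>
      simp only [List.map_cons, Bool.false_eq_true, if_false, mySplit, pvRunLens, ite_true]
      rw [ih []]
      simp [PySem.List.len_eq]

theorem pvRunLens_cons (fs : List Bool) : ∀ n : Int, ∃ x t, pvRunLens n fs = x :: t ∧ n ≤ x := by
  induction fs with
  | nil => intro n; exact ⟨n, [], rfl, le_rfl⟩
  | cons f r ih =>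
    intro n
    cases f with
    | true =>
      obtain ⟨x, t, hx, hle⟩ := ih (n + 1)
      exact ⟨x, t, hx, by omega⟩
    | false => exact ⟨n, pvRunLens 0 r, rfl, le_rfl⟩

theorem pvFoldlMax_runLens (fs : List Bool) : ∀ (n a : Int),
    (pvRunLens n fs).foldl max (max a n) = (pvRunLens n fs).foldl max a := by
  induction fs with
  | nil => intro n a; simp [pvRunLens]
  | cons f r ih =>
    intro n a
    cases f with
    | true =>
      simp only [pvRunLens]
      rw [← ih (n + 1) a, ← ih (n + 1) (max a n), max_assoc,
        max_eq_right (by omega : n ≤ n + 1)]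
    | false =>
      simp only [pvRunLens, List.foldl_cons]
      rw [max_assoc, max_self]

theorem pvCounterFold_eq (fs : List Bool) : ∀ (count maxc : Int), 0 ≤ count → count ≤ maxc →
    pvCounterFold count maxc fs = (pvRunLens count fs).foldl max maxc := by
  induction fs with
  | nil => intro count maxc _ hle; simp [pvRunLens, pvCounterFold, max_eq_left hle]
  | cons f r ih =>
    intro count maxc hc hle
    cases f with
    | true =>
      simp only [pvCounterFold, if_true, pvRunLens]
      have hM : (if count + 1 > maxc then count + 1 else maxc) = max maxc (count + 1) := by
        split_ifs <;> omega
      rw [ih (count + 1) _ (by omega) (by rw [hM]; omega), hM]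
      exact pvFoldlMax_runLens r (count + 1) maxc
    | false =>
      simp only [pvCounterFold, Bool.false_eq_true, if_false, pvRunLens, List.foldl_cons]
      rw [ih 0 maxc le_rfl (by omega), max_eq_left (by omega)]

-- ===== VERDICT (by name: the statement is the Claim_ definition above) =====
theorem continue_palindromic_words_spec : Claim_equal_continue_palindromic_words := by
  intro s _
  unfold Spec_continue_palindromic_words
  have hA : continue_palindromic_words s = ((pvFilterA s.toList).foldl pvStepA (0, 0, [])).2.1 := rfl
  rw [hA, pvAfold _ 0 0 [] le_rfl, pvFilterA_eq_flatMap, pvClean_eq]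
  have hB : continue_palindromic_words_alt s
      = (PySem.List.max? ((PySem.Chars.splitOn (PySem.Chars.join []
          (((PySem.Chars.splitOn
              ((s.toList.filter (fun c => PySem.Chars.isalpha c || c == ' ')).map PySem.Chars.lowerChar)
              [' ']).dropLast).map (fun t => if t == t.reverse then ['1'] else ['0'])))
          ['0']).map PySem.List.len) (fun x => x)).getD 0 := rfl
  rw [hB, pvSplitOn_single, pvSplitOn_single]
  set tokens := (mySplit ' ' []
    ((s.toList.filter (fun c => PySem.Chars.isalpha c || c == ' ')).map PySem.Chars.lowerChar)).dropLast with htok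
  set fs := tokens.map (fun t => t == t.reverse) with hfs
  have hflags : PySem.Chars.join []
      (tokens.map (fun t => if t == t.reverse then ['1'] else ['0']))
      = fs.map (fun b => if b then '1' else '0') := by
    have h1 : tokens.map (fun t => if t == t.reverse then ['1'] else ['0'])
        = (fs.map (fun b => if b then '1' else '0')).map (fun c => [c]) := by
      rw [hfs, List.map_map, List.map_map]
      apply List.map_congr_left
      intro t _
      by_cases h : (t == t.reverse) = true <;> simp [h]
    rw [h1, PySem.Chars.join_nil_singletons]
  rw [hflags, pvSplitMapLen fs [], pvCounterFold_eq fs 0 0 le_rfl le_rfl]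
  obtain ⟨x, t, hx, hxe⟩ := pvRunLens_cons fs 0
  simp only [List.length_nil, Nat.cast_zero, hx, PySem.List.max?_id_cons, Option.getD_some,
    List.foldl_cons]
  rw [max_eq_right hxe]
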